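-- pv_equiv track=rewrite | github.com/Mart1n66/school | python/fundamentals/listy.3.py | F
-- ===== SOURCE A (Python) =====
-- def F(t):
--     pocet = 0
--     for prvok in t:
--         pocet += 1
--         for znak in prvok:
--             if prvok.count(znak) > 1:
--                 pocet -= 1
--                 break
--     return pocet
-- ===== SOURCE B (Python) =====
-- def F(t):
--     pocet = 0
--     for prvok in t:
--         s = sorted(prvok)
--         ok = True
--         for a, b in zip(s, s[1:]):
--             if a == b:
--                 ok = False
--                 break
--         if ok:
--             pocet += 1
--     return pocet
-- ===== Notes on version B (the rewrite author's own statement) =====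
-- stated objective: alternative
-- what changed: A rescans the whole string with str.count for every character (quadratic per string); B sorts each string's characters once and counts the string if no two adjacent characters of the sorted sequence are equal.
import Mathlib
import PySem

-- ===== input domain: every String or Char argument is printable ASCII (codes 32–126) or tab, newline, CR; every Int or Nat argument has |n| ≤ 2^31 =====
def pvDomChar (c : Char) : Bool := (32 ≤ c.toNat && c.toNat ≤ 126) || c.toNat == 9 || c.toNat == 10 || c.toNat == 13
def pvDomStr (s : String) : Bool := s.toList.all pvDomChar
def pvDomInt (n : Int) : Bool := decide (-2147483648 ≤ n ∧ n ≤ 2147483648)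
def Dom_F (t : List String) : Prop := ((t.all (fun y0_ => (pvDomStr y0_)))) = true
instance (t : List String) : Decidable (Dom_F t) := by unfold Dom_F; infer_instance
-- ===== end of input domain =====

-- A counts the strings of t whose characters are all distinct; B does the same by
-- sorting each string's characters and checking no two adjacent sorted characters are equal
-- (alternative decomposition; exact same return value).

-- ===== PORT A =====
-- inner 'for znak in prvok: if prvok.count(znak) > 1: pocet -= 1; break'
def pvInnerA (s : List Char) : List Char → Int → Int
  | [], pocet => pocet
  | c :: rest, pocet =>
      if PySem.Chars.count s [c] > 1 then pocet - 1 else pvInnerA s rest pocet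

def F (t : List String) : Int :=
  t.foldl (fun pocet prvok => pvInnerA prvok.toList prvok.toList (pocet + 1)) 0

-- ===== PORT B =====
-- inner 'for a, b in zip(s, s[1:]): if a == b: ok = False; break'
def pvInnerB : List (Char × Char) → Bool
  | [] => true
  | (a, b) :: rest => if a == b then false else pvInnerB rest

def F_alt (t : List String) : Int :=
  t.foldl
    (fun pocet prvok =>
      let s := PySem.List.sorted prvok.toList (fun x => x) false
      let ok := pvInnerB (s.zip (PySem.List.slice s (some 1) none))
      if ok then pocet + 1 else pocet) 0

-- ===== PRECONDITION & SPEC =====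
def Spec_F (t : List String) (out : Int) : Prop := out = F_alt t
instance (t : List String) (out : Int) : Decidable (Spec_F t out) := by unfold Spec_F; infer_instance

-- ===== CLAIM (what is proved, stated in full; the proofs are below) =====
def Claim_equal_F : Prop := ∀ (t : List String), Dom_F t → Spec_F t (F t)

-- ===== LEMMAS AND PROOFS =====

-- str.count with a one-character needle is the character count
theorem count_go_singleton (c : Char) (l : List Char) (fuel : Nat) (acc : Nat)
    (h : l.length ≤ fuel) :
    PySem.Chars.count.go [c] fuel l acc = acc + l.count c := by
  induction l generalizing fuel acc with
  | nil => cases fuel <;> simp [PySem.Chars.count.go]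
  | cons a rest ih =>
      cases fuel with
      | zero => simp at h
      | succ f =>
          simp only [List.length_cons, Nat.succ_le_succ_iff] at h
          by_cases hc : a = c
          · subst hc
            simp [PySem.Chars.count.go, List.isPrefixOf, ih f _ h]
            omega
          · simp [PySem.Chars.count.go, List.isPrefixOf, hc, ih f _ h, Ne.symm hc]

theorem count_singleton (s : List Char) (c : Char) :
    PySem.Chars.count s [c] = s.count c := by
  simp [PySem.Chars.count, count_go_singleton c s s.length 0 le_rfl]

theorem pvInnerA_eq (s l : List Char) (p : Int) :
    pvInnerA s l p = if l.any (fun c => 1 < s.count c) then p - 1 else p := by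
  induction l with
  | nil => simp [pvInnerA]
  | cons a rest ih =>
      by_cases h : 1 < s.count a
      · simp [pvInnerA, count_singleton, h]
      · simp [pvInnerA, count_singleton, h, ih]

theorem pvInnerB_eq_true_iff (ps : List (Char × Char)) :
    pvInnerB ps = true ↔ ∀ q ∈ ps, q.1 ≠ q.2 := by
  induction ps with
  | nil => simp [pvInnerB]
  | cons q rest ih =>
      obtain ⟨a, b⟩ := q
      by_cases h : a = b <;> simp [pvInnerB, h, ih]

theorem adj_ne_iff_nodup (l : List Char) (hpw : l.Pairwise (fun a b => a ≤ b)) :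
    (∀ q ∈ l.zip (l.drop 1), q.1 ≠ q.2) ↔ l.Nodup := by
  induction l with
  | nil => simp
  | cons a l ih =>
      cases l with
      | nil => simp
      | cons b l' =>
          have hab : a ≤ b := List.rel_of_pairwise_cons hpw (by simp)
          have hpw' : (b :: l').Pairwise (fun a b => a ≤ b) := hpw.of_cons
          rw [show (a :: b :: l').zip ((a :: b :: l').drop 1)
                = (a, b) :: (b :: l').zip ((b :: l').drop 1) by simp]
          constructor
          · rintro h
            have hne : a ≠ b := h (a, b) (by simp)
            have hrest : (b :: l').Nodup := (ih hpw').mp (fun q hq => h q (List.mem_cons_of_mem _ (by simpa using hq)))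
            refine List.nodup_cons.mpr ⟨?_, hrest⟩
            intro hmem
            rcases List.mem_cons.mp hmem with h1 | h2
            · exact hne h1
            · exact hne (le_antisymm hab (List.rel_of_pairwise_cons hpw' h2))
          · intro h
            rcases List.nodup_cons.mp h with ⟨hnm, hrest⟩
            intro q hq
            rcases List.mem_cons.mp hq with h1 | h2
            · subst h1; simpa using fun hab' => hnm (by simp [hab'])
            · exact ((ih hpw').mpr hrest) q h2

theorem pvInnerB_sorted (s : List Char) :
    pvInnerB ((PySem.List.sorted s (fun x => x) false).zip
        (PySem.List.slice (PySem.List.sorted s (fun x => x) false) (some 1) none))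
      = true ↔ s.Nodup := by
  have hslice : ∀ (l : List Char), PySem.List.slice l (some 1) none = l.drop 1 := by
    intro l
    simpa using PySem.List.slice_from l (a := 1) (by norm_num)
  rw [hslice, pvInnerB_eq_true_iff,
    adj_ne_iff_nodup _ (PySem.List.sorted_pairwise s (fun x => x)),
    (PySem.List.sorted_perm s (fun x => x) false).nodup_iff]

theorem step_eq (p : Int) (prvok : String) :
    pvInnerA prvok.toList prvok.toList (p + 1)
      = (let s := PySem.List.sorted prvok.toList (fun x => x) false
         let ok := pvInnerB (s.zip (PySem.List.slice s (some 1) none))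
         if ok then p + 1 else p) := by
  simp only [pvInnerA_eq, pvInnerB_sorted]
  by_cases h : (prvok.toList).Nodup
  · have : ¬ (prvok.toList).any (fun c => 1 < (prvok.toList).count c) := by
      simp only [List.any_eq_true, not_exists]
      intro c
      simp only [decide_eq_true_eq, not_and, not_lt]
      intro _
      exact List.nodup_iff_count_le_one.mp h c
    simp [this, h]
  · have : (prvok.toList).any (fun c => 1 < (prvok.toList).count c) := by
      rw [List.nodup_iff_count_le_one] at h
      rw [not_forall] at h
      simp only [not_le] at h
      obtain ⟨c, hc⟩ := h
      have hmem : c ∈ prvok.toList := List.count_pos_iff.mp (by omega)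
      simp only [List.any_eq_true]
      exact ⟨c, hmem, by simpa using hc⟩
    simp [this, h]

-- ===== VERDICT (by name: the statement is the Claim_ definition above) =====
theorem F_spec : Claim_equal_F := by
  intro t _
  show F t = F_alt t
  unfold F F_alt
  simp only [step_eq]
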